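-- pv_equiv track=rewrite | github.com/ting1011/2026-python | weeks/week-10/solutions/1114405022/QUESTION-10268.py | derivative_value
-- ===== SOURCE A (Python) =====
-- def derivative_value(x: int, coeffs: list[int]) -> int:
--     n = len(coeffs) - 1
--     if n <= 0:
--         return 0
--
--     ans = 0
--     for i, c in enumerate(coeffs[:-1]):
--         power = n - i
--         ans = ans * x + c * power
--     return ans
-- ===== SOURCE B (Python) =====
-- def derivative_value(x: int, coeffs: list[int]) -> int:
--     # Walk the coefficients back-to-front (constant term first), summing each
--     # derivative term c * power * x**(power-1) with the power of x kept incrementally.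
--     total = 0
--     xp = 1          # x ** (power - 1), once power >= 1
--     power = 0
--     for c in reversed(coeffs):
--         if power >= 1:
--             total += c * power * xp
--             xp *= x
--         power += 1
--     return total
-- ===== Notes on version B (the rewrite author's own statement) =====
-- stated objective: alternative
-- what changed: Replaces Horner's front-to-back multiply-accumulate (with a length guard) by a single guard-free back-to-front walk that sums the derivative terms c*power*x^(power-1) directly, maintaining the power of x incrementally.
import Mathlib
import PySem

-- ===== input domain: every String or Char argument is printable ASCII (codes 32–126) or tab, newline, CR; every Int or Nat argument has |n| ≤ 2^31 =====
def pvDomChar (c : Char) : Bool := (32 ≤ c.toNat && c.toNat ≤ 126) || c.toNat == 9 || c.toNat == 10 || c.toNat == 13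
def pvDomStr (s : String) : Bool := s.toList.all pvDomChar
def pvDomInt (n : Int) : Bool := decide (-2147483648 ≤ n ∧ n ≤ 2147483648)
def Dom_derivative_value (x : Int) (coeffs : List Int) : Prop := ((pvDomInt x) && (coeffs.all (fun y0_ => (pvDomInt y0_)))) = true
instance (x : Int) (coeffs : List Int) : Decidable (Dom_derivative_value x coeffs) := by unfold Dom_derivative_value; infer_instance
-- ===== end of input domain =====

-- B replaces A's guarded Horner multiply-accumulate by a guard-free back-to-front walk
-- summing the derivative terms c*power*x^(power-1) with the power of x kept incrementally.

-- ===== PORT A =====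
def derivative_value (x : Int) (coeffs : List Int) : Int :=
  let n : Int := (coeffs.length : Int) - 1
  if n ≤ 0 then 0
  else
    (PySem.List.enumerate (PySem.List.slice coeffs none (some (-1))) 0).foldl
      (fun ans p => ans * x + p.2 * (n - p.1)) 0

-- ===== PORT B =====
-- the for-loop over reversed(coeffs) with state (total, xp, power), as structural recursion
def dvLoop (x : Int) : List Int → Int × Int × Int → Int × Int × Int
  | [], s => s
  | c :: rest, (total, xp, power) =>
      dvLoop x rest
        (if 1 ≤ power then (total + c * power * xp, xp * x, power + 1)
         else (total, xp, power + 1))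

def derivative_value_alt (x : Int) (coeffs : List Int) : Int :=
  (dvLoop x coeffs.reverse (0, 1, 0)).1

-- ===== PRECONDITION & SPEC =====
def Spec_derivative_value (x : Int) (coeffs : List Int) (out : Int) : Prop := out = derivative_value_alt x coeffs
instance (x : Int) (coeffs : List Int) (out : Int) : Decidable (Spec_derivative_value x coeffs out) := by unfold Spec_derivative_value; infer_instance

-- ===== CLAIM (what is proved, stated in full; the proofs are below) =====
def Claim_equal_derivative_value : Prop := ∀ (x : Int) (coeffs : List Int), Dom_derivative_value x coeffs → Spec_derivative_value x coeffs (derivative_value x coeffs)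

-- ===== LEMMAS AND PROOFS =====

-- Horner's fold over the enumerated list equals the direct power sum, provided n is the
-- start index plus the number of remaining elements.
lemma horner_enum (x n : Int) :
    ∀ (l : List Int) (k acc : Int), n = k + (l.length : Int) →
      (PySem.List.enumerate l k).foldl (fun ans p => ans * x + p.2 * (n - p.1)) acc
        = acc * x ^ l.length
          + ((PySem.List.enumerate l k).map
              (fun p => p.2 * (n - p.1) * x ^ (n - p.1 - 1).toNat)).sum := by
  intro l
  induction l with
  | nil => intro k acc h; simp [PySem.List.enumerate_nil]
  | cons c t ih =>
    intro k acc h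
    have hn : n = (k + 1) + (t.length : Int) := by
      simp at h; omega
    have hexp : (n - k - 1).toNat = t.length := by omega
    rw [PySem.List.enumerate_cons]
    simp only [List.foldl_cons, List.map_cons, List.sum_cons]
    rw [ih (k + 1) (acc * x + c * (n - k)) hn, hexp, List.length_cons, pow_succ]
    ring

-- B's loop, once power ≥ 1, sums the terms c * power * xp·x^(offset) directly.
lemma dvLoop_enum (x : Int) :
    ∀ (l : List Int) (k : Int), 1 ≤ k →
      ∀ (total xp : Int),
      (dvLoop x l (total, xp, k)).1
        = total + ((PySem.List.enumerate l k).map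
              (fun p => p.2 * p.1 * (xp * x ^ (p.1 - k).toNat))).sum := by
  intro l
  induction l with
  | nil => intro k hk total xp; simp [dvLoop, PySem.List.enumerate_nil]
  | cons c t ih =>
    intro k hk total xp
    rw [PySem.List.enumerate_cons]
    simp only [List.map_cons, List.sum_cons]
    have : dvLoop x (c :: t) (total, xp, k)
        = dvLoop x t (total + c * k * xp, xp * x, k + 1) := by
      simp [dvLoop, hk]
    rw [this, ih (k + 1) (by omega) (total + c * k * xp) (xp * x)]
    have hmap : ∀ p ∈ PySem.List.enumerate t (k + 1),
        p.2 * p.1 * (xp * x * x ^ (p.1 - (k + 1)).toNat)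
          = p.2 * p.1 * (xp * x ^ (p.1 - k).toNat) := by
      intro p hp
      obtain ⟨j, hj, hpe⟩ := (PySem.List.mem_enumerate_iff t (k + 1) p).1 hp
      have h1 : p.1 = k + 1 + (j : Int) := by rw [hpe]
      have h2 : (p.1 - k).toNat = (p.1 - (k + 1)).toNat + 1 := by omega
      rw [h2, pow_succ]; ring
    rw [List.map_congr_left hmap]
    have h0 : (k - k).toNat = 0 := by omega
    rw [h0, pow_zero, mul_one]
    ring

-- The front-to-back sum with weights (n - i) equals the back-to-front sum over the
-- reversed list enumerated from 1 (B's summation order).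
lemma rev_sum (x n : Int) :
    ∀ (l : List Int) (k : Int), n = k + (l.length : Int) →
      ((PySem.List.enumerate l k).map
          (fun p => p.2 * (n - p.1) * x ^ (n - p.1 - 1).toNat)).sum
        = ((PySem.List.enumerate l.reverse 1).map
              (fun p => p.2 * p.1 * (1 * x ^ (p.1 - 1).toNat))).sum := by
  intro l
  induction l with
  | nil => intro k h; simp [PySem.List.enumerate_nil]
  | cons c t ih =>
    intro k h
    have hn : n = (k + 1) + (t.length : Int) := by simp at h; omega
    rw [PySem.List.enumerate_cons]
    simp only [List.map_cons, List.sum_cons, List.reverse_cons]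
    rw [PySem.List.enumerate_append, ih (k + 1) hn]
    simp only [List.map_append, List.sum_append, List.length_reverse]
    have h1 : n - k = 1 + (t.length : Int) := by omega
    simp [PySem.List.enumerate_cons, PySem.List.enumerate_nil, h1]
    have h3 : ((1 : Int) + (t.length : Int)).toNat - 1 = t.length := by omega
    rw [h3]
    ring

-- ===== VERDICT (by name: the statement is the Claim_ definition above) =====
theorem derivative_value_spec : Claim_equal_derivative_value := by
  intro x coeffs _
  unfold Spec_derivative_value derivative_value derivative_value_alt
  simp only []
  by_cases h : (coeffs.length : Int) - 1 ≤ 0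
  · -- coeffs is [] or a singleton: both sides are 0
    simp only [h, if_true]
    match coeffs, h with
    | [], _ => simp [dvLoop]
    | [c], _ => simp [dvLoop]
    | c :: d :: t, h => simp at h; omega
  · simp only [h, if_false]
    match coeffs, h with
    | [], h => simp at h
    | c :: t, h =>
      rw [PySem.List.slice_to_neg_one]
      have hne : (c :: t) ≠ [] := by simp
      -- split off the last element: coeffs.reverse = last :: dropLast.reverse
      have hsplit : (c :: t).reverse
          = (c :: t).getLast hne :: (c :: t).dropLast.reverse := by
        conv_lhs => rw [← List.dropLast_append_getLast hne]
        simp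
      have hlen : ((c :: t).dropLast.length : Int) = ((c :: t).length : Int) - 1 := by
        simp [List.length_dropLast]
      rw [hsplit]
      have hfirst : dvLoop x ((c :: t).getLast hne :: (c :: t).dropLast.reverse) (0, 1, 0)
          = dvLoop x (c :: t).dropLast.reverse (0, 1, 1) := by
        simp [dvLoop]
      rw [hfirst,
        horner_enum x (((c :: t).length : Int) - 1) (c :: t).dropLast 0 0 (by omega),
        dvLoop_enum x (c :: t).dropLast.reverse 1 (by omega) 0 1,
        rev_sum x (((c :: t).length : Int) - 1) (c :: t).dropLast 0 (by omega)]
      simp
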